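-- pv_equiv track=rewrite | github.com/Enknable/Codingame | Skynet Revolution - Episode 2.py | create_node_weights
-- ===== SOURCE A (Python) =====
-- def create_node_weights(graph, gateways, cost_graph):
--
--     for i in graph:
--         for j in gateways:
--             if j in graph[i]:
--                 if i in cost_graph:
--                     cost_graph[i] += 1
--                 else:
--                     cost_graph[i] = 1
--     return cost_graph
-- ===== SOURCE B (Python) =====
-- def create_node_weights(graph, gateways, cost_graph):
--     mult = {}
--     for j in gateways:
--         mult[j] = mult.get(j, 0) + 1
--     gw = set(mult)
--     for i in graph:
--         hit = gw & set(graph[i])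
--         if hit:
--             cost_graph[i] = cost_graph.get(i, 0) + sum(mult[j] for j in hit)
--     return cost_graph
-- ===== Notes on version B (the rewrite author's own statement) =====
-- stated objective: faster
-- what changed: A's nested loop incrementing the dict once per (node, gateway) hit is replaced by a gateway-multiplicity dict built once, a set intersection of distinct gateways with each node's neighbor set, and a single accumulated dict write per node.
import Mathlib
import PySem

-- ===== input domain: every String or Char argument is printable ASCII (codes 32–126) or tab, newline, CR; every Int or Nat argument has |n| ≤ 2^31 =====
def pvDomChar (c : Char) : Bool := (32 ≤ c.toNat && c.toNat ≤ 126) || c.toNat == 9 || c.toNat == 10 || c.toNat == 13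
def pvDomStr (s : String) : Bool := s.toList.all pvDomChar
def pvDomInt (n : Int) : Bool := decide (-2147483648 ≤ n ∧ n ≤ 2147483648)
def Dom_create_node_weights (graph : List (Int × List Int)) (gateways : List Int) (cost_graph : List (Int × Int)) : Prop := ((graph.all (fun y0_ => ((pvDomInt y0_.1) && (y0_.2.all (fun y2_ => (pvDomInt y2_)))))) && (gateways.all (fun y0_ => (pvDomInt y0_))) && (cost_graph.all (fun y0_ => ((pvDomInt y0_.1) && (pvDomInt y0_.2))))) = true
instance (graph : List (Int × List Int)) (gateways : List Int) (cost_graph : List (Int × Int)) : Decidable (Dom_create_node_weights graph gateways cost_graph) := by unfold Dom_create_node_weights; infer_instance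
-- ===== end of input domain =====

-- B replaces A's per-gateway increment loop by a gateway-multiplicity dict built once plus one
-- set-intersection and a single dict write per node, removing the per-gateway membership scans (objective: faster; measured faster in a timing run).
-- Both A and B mutate cost_graph in place in Python; the equivalence proved here is about the return value.

-- ===== PORT A =====
def create_node_weights (graph : List (Int × List Int)) (gateways : List Int) (cost_graph : List (Int × Int)) : List (Int × Int) :=
  let g : PySem.Dict Int (List Int) := PySem.Dict.mk graph
  -- `for i in graph` iterates the dict's keys; `graph[i]` is a lookup (always hits: i is a key)
  ((graph.map (·.1)).foldl (fun cg i =>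
      gateways.foldl (fun cg j =>
        if ((g.get? i).getD []).contains j then
          if cg.contains i then cg.modify i 0 (· + 1) else cg.insert i (1 : Int)
        else cg) cg)
    (PySem.Dict.mk cost_graph)).items

-- ===== PORT B =====
def create_node_weights_alt (graph : List (Int × List Int)) (gateways : List Int) (cost_graph : List (Int × Int)) : List (Int × Int) :=
  let mult : PySem.Dict Int Int := gateways.foldl (fun d j => d.insert j (d.getD j 0 + 1)) PySem.Dict.empty
  let gw : PySem.Set Int := mult.keys
  let g : PySem.Dict Int (List Int) := PySem.Dict.mk graph
  ((graph.map (·.1)).foldl (fun out i =>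
      let hit : PySem.Set Int := PySem.Set.inter gw (PySem.Set.ofList ((g.get? i).getD []))
      if hit.isEmpty then out
      -- sum(mult[j] for j in hit): every j ∈ hit is a key of mult, so the getD default is never used
      else out.insert i (out.getD i 0 + hit.foldl (fun c j => c + mult.getD j 0) 0))
    (PySem.Dict.mk cost_graph)).items

-- ===== PRECONDITION & SPEC =====
def Spec_create_node_weights (graph : List (Int × List Int)) (gateways : List Int) (cost_graph : List (Int × Int)) (out : List (Int × Int)) : Prop := out = create_node_weights_alt graph gateways cost_graph
instance (graph : List (Int × List Int)) (gateways : List Int) (cost_graph : List (Int × Int)) (out : List (Int × Int)) : Decidable (Spec_create_node_weights graph gateways cost_graph out) := by unfold Spec_create_node_weights; infer_instance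

-- ===== CLAIM (what is proved, stated in full; the proofs are below) =====
def Claim_equal_create_node_weights : Prop := ∀ (graph : List (Int × List Int)) (gateways : List Int) (cost_graph : List (Int × Int)), Dom_create_node_weights graph gateways cost_graph → Spec_create_node_weights graph gateways cost_graph (create_node_weights graph gateways cost_graph)

-- ===== LEMMAS AND PROOFS =====

theorem pv_step1 (cg : PySem.Dict Int Int) (i : Int) :
    (if cg.contains i then cg.modify i 0 (· + 1) else cg.insert i (1 : Int))
      = cg.insert i (cg.getD i 0 + 1) := by
  by_cases h : cg.contains i = true
  · simp [h, PySem.Dict.modify]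
  · simp only [Bool.not_eq_true] at h
    simp [h, PySem.Dict.getD_of_not_contains cg 0 h]

theorem pv_innerA' (nbrs : List Int) (i : Int) :
    ∀ (gs : List Int) (cg : PySem.Dict Int Int),
      gs.foldl (fun cg j => if nbrs.contains j then cg.insert i (cg.getD i 0 + 1) else cg) cg
      = (if ((gs.filter (fun j => nbrs.contains j)).length : Int) = 0 then cg
         else cg.insert i (cg.getD i 0 + ((gs.filter (fun j => nbrs.contains j)).length : Int))) := by
  intro gs
  induction gs with
  | nil => intro cg; simp
  | cons j gs ih =>
    intro cg
    by_cases hj : nbrs.contains j = true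
    · simp only [List.foldl_cons, List.filter_cons, hj, if_pos]
      rw [ih]
      by_cases hn : ((gs.filter (fun j => nbrs.contains j)).length : Int) = 0
      · rw [if_pos hn]
        simp only [List.length_cons]
        rw [if_neg (by push_cast at hn ⊢; omega)]
        congr 1
        push_cast at hn ⊢
        omega
      · simp only [hn, ite_false, List.length_cons,
          PySem.Dict.insert_insert_self, PySem.Dict.getD_insert_self]
        split
        · omega
        · congr 1; push_cast; ring
    · simp only [Bool.not_eq_true] at hj
      simp only [List.foldl_cons, List.filter_cons, hj, Bool.false_eq_true, ite_false]
      exact ih cg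

theorem pv_innerA (nbrs : List Int) (i : Int) (gs : List Int) (cg : PySem.Dict Int Int) :
      gs.foldl (fun cg j =>
        if nbrs.contains j then
          if cg.contains i then cg.modify i 0 (· + 1) else cg.insert i (1 : Int)
        else cg) cg
      = (if ((gs.filter (fun j => nbrs.contains j)).length : Int) = 0 then cg
         else cg.insert i (cg.getD i 0 + ((gs.filter (fun j => nbrs.contains j)).length : Int))) := by
  rw [← pv_innerA' nbrs i gs cg]
  congr 1
  funext cg j
  by_cases hj : nbrs.contains j = true <;> simp [pv_step1]


theorem pv_contains_ofList (nbrs : List Int) (x : Int) :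
    (PySem.Set.ofList nbrs).contains x = nbrs.contains x := by
  cases h : nbrs.contains x <;> simp_all [PySem.Set.mem_ofList]

-- the set-intersection is a filter of the deduplicated gateways
theorem pv_hit_eq (gateways nbrs : List Int) :
    PySem.Set.inter (gateways.foldl (fun d j => d.insert j (d.getD j 0 + 1)) (PySem.Dict.empty : PySem.Dict Int Int)).keys
        (PySem.Set.ofList nbrs)
      = (PySem.Set.ofList gateways).filter (fun j => nbrs.contains j) := by
  rw [PySem.Dict.keys_foldl_insert gateways (fun d x => d.getD x 0 + 1) PySem.Dict.empty]
  show (PySem.Set.ofList gateways).inter (PySem.Set.ofList nbrs)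
      = (PySem.Set.ofList gateways).filter (fun j => nbrs.contains j)
  have h2 : ∀ s t : PySem.Set Int, PySem.Set.inter s t = s.filter (fun x => t.contains x) := by
    intro s t; rfl
  rw [h2]
  exact List.filter_congr (fun x _ => by rw [pv_contains_ofList])

theorem pv_perm (gateways : List Int) :
    (PySem.Set.ofList gateways).Perm gateways.dedup := by
  rw [List.perm_ext_iff_of_nodup (PySem.Set.nodup_ofList gateways) gateways.nodup_dedup]
  intro a
  rw [PySem.Set.mem_ofList, List.mem_dedup]

theorem pv_count (gateways nbrs : List Int) :
    (PySem.Set.inter (gateways.foldl (fun d j => d.insert j (d.getD j 0 + 1)) (PySem.Dict.empty : PySem.Dict Int Int)).keys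
        (PySem.Set.ofList nbrs)).foldl
      (fun c j => c + (gateways.foldl (fun d j => d.insert j (d.getD j 0 + 1)) (PySem.Dict.empty : PySem.Dict Int Int)).getD j 0) 0
      = ((gateways.filter (fun j => nbrs.contains j)).length : Int) := by
  rw [pv_hit_eq, PySem.List.foldl_add]
  have hm : ∀ j : Int,
      (gateways.foldl (fun d j => d.insert j (d.getD j 0 + 1)) (PySem.Dict.empty : PySem.Dict Int Int)).getD j 0
        = (gateways.count j : Int) := by
    intro j
    rw [PySem.Dict.getD_foldl_insert_add_one]
    simp
  rw [List.map_congr_left (fun j _ => hm j)]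
  have hperm := ((pv_perm gateways).filter (fun j => nbrs.contains j)).map
      (fun j => (gateways.count j : Int))
  rw [hperm.sum_eq]
  have := List.sum_map_count_dedup_filter_eq_countP (fun j => nbrs.contains j) gateways
  have hcast : ((gateways.dedup.filter (fun j => nbrs.contains j)).map
      (fun j => (gateways.count j : Int))).sum
      = (((gateways.dedup.filter (fun j => nbrs.contains j)).map
          (fun j => gateways.count j)).sum : Int) := by
    rw [Nat.cast_list_sum, List.map_map]; rfl
  rw [hcast, this]
  simp [List.countP_eq_length_filter]

theorem pv_hit_empty (gateways nbrs : List Int) :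
    (PySem.Set.inter (gateways.foldl (fun d j => d.insert j (d.getD j 0 + 1)) (PySem.Dict.empty : PySem.Dict Int Int)).keys
        (PySem.Set.ofList nbrs)).isEmpty
      = decide (((gateways.filter (fun j => nbrs.contains j)).length : Int) = 0) := by
  rw [pv_hit_eq]
  have : ((PySem.Set.ofList gateways).filter (fun j => nbrs.contains j)) = []
      ↔ (gateways.filter (fun j => nbrs.contains j)) = [] := by
    simp only [List.eq_nil_iff_forall_not_mem, List.mem_filter, PySem.Set.mem_ofList]
  cases h : ((PySem.Set.ofList gateways).filter (fun j => nbrs.contains j)).isEmpty <;>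
    simp_all [List.isEmpty_iff, List.length_eq_zero_iff]

-- ===== VERDICT (by name: the statement is the Claim_ definition above) =====
theorem create_node_weights_spec : Claim_equal_create_node_weights := by
  intro graph gateways cost_graph _
  unfold Spec_create_node_weights create_node_weights create_node_weights_alt
  simp only []
  refine congrArg PySem.Dict.items ?_
  apply List.foldl_ext
  intro cg i _
  rw [pv_innerA (((PySem.Dict.mk graph).get? i).getD []) i gateways cg,
      pv_hit_empty gateways (((PySem.Dict.mk graph).get? i).getD []),
      pv_count gateways (((PySem.Dict.mk graph).get? i).getD [])]
  by_cases hn : (((gateways.filter (fun j => (((PySem.Dict.mk graph).get? i).getD []).contains j)).length : Int) = 0) <;>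
    simp
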